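-- pv_equiv track=rewrite | github.com/tilaboy/xml-miner | xml_miner/data_utils/data_loader.py | load_from_string
-- ===== SOURCE A (Python) =====
-- def load_from_string(xml_string, header_line):
--     """
--     load document string, the string might contain multiple xml files
--
--     params:
--         xml_string (string): input xml strings
--
--     output:
--         xml string: a iterator object to generate xml string
--     """
--     xml_lines = []
--     for line in xml_string.splitlines():
--         if line.startswith(header_line):
--             if xml_lines:
--                 xml = "\n".join(xml_lines)
--                 yield xml
--             xml_lines = [line]
--         elif line.startswith('<?xml'):
--             pass
--         else:
--             xml_lines.append(line)
--     xml = "\n".join(xml_lines)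
--     yield xml
-- ===== SOURCE B (Python) =====
-- def load_from_string(xml_string, header_line):
--     """Two-pass re-implementation: filter lines, locate header indices, then
--     emit slices between consecutive headers (same yields as the streaming A)."""
--     lines = [l for l in xml_string.splitlines()
--              if l.startswith(header_line) or not l.startswith('<?xml')]
--     idxs = [i for i, l in enumerate(lines) if l.startswith(header_line)]
--     if not idxs:
--         yield "\n".join(lines)
--         return
--     if idxs[0] > 0:
--         yield "\n".join(lines[:idxs[0]])
--     for start, stop in zip(idxs, idxs[1:] + [len(lines)]):
--         yield "\n".join(lines[start:stop])
-- ===== Notes on version B (the rewrite author's own statement) =====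
-- stated objective: alternative
-- what changed: Replaced A's single-pass streaming accumulator (flush-on-header) by a two-pass index-and-partition structure: filter the lines once, compute the header positions, then emit the joined slices between consecutive header indices.
import Mathlib
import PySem

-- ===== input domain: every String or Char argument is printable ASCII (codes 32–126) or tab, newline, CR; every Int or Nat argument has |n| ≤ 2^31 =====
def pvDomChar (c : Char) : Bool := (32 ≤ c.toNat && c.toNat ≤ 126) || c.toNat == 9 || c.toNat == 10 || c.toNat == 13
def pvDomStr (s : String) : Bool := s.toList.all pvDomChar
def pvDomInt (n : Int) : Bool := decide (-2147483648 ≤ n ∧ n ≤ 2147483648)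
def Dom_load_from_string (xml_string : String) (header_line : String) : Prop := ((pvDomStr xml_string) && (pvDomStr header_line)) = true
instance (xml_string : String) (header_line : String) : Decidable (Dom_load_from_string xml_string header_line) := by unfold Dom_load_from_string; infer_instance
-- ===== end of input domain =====

-- B replaces A's streaming flush-on-header accumulator by a two-pass
-- filter + header-index partition (alternative decomposition, same cost).

-- ===== PORT A =====
def load_from_string (xml_string : String) (header_line : String) : List String :=
  let step := fun (s : List String × List String) (line : String) =>
    if PySem.Str.startswith line header_line then
      (if s.1 ≠ [] then ([line], s.2 ++ [PySem.Str.join "\n" s.1]) else ([line], s.2))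
    else if PySem.Str.startswith line "<?xml" then s
    else (s.1 ++ [line], s.2)
  let s := (PySem.Str.splitlines xml_string).foldl step ([], [])
  s.2 ++ [PySem.Str.join "\n" s.1]

-- ===== PORT B =====
-- core of Source B after the line-filter comprehension (helper for the port)
def pvAltCore (header_line : String) (lines : List String) : List String :=
  let idxs := (PySem.List.enumerate lines 0).filterMap
    (fun il => if PySem.Str.startswith il.2 header_line then some il.1 else none)
  match idxs with
  | [] => [PySem.Str.join "\n" lines]
  | i0 :: rest =>
    (if i0 > 0 then [PySem.Str.join "\n" (PySem.List.slice lines none (some i0))] else []) ++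
    (List.zip (i0 :: rest) (rest ++ [(lines.length : Int)])).map
      (fun ij => PySem.Str.join "\n" (PySem.List.slice lines (some ij.1) (some ij.2)))

def load_from_string_alt (xml_string : String) (header_line : String) : List String :=
  pvAltCore header_line
    ((PySem.Str.splitlines xml_string).filter
      (fun l => PySem.Str.startswith l header_line || !PySem.Str.startswith l "<?xml"))

-- ===== PRECONDITION & SPEC =====
def Spec_load_from_string (xml_string : String) (header_line : String) (out : List String) : Prop := out = load_from_string_alt xml_string header_line
instance (xml_string : String) (header_line : String) (out : List String) : Decidable (Spec_load_from_string xml_string header_line out) := by unfold Spec_load_from_string; infer_instance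

-- ===== CLAIM (what is proved, stated in full; the proofs are below) =====
def Claim_equal_load_from_string : Prop := ∀ (xml_string : String) (header_line : String), Dom_load_from_string xml_string header_line → Spec_load_from_string xml_string header_line (load_from_string xml_string header_line)

-- ===== LEMMAS AND PROOFS =====

-- groups of lines split at headers: (leading group, header-started groups)
def pvGroups (P : String → Bool) : List String → List String × List (List String)
  | [] => ([], [])
  | l :: rest =>
    let g := pvGroups P rest
    if P l then ([], (l :: g.1) :: g.2) else (l :: g.1, g.2)

-- final list of joined groups, dropping an empty leading group when headers exist
def pvFinalize (g : List String × List (List String)) : List String :=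
  (if g.1 = [] ∧ g.2 ≠ [] then g.2 else g.1 :: g.2).map (PySem.Str.join "\n")

-- header indices, structurally
def pvIdxsN (P : String → Bool) : List String → List Nat
  | [] => []
  | l :: rest =>
    if P l then 0 :: (pvIdxsN P rest).map (· + 1) else (pvIdxsN P rest).map (· + 1)

theorem pvFoldl_skip {α β : Type} (step : β → α → β) (keep : α → Bool)
    (h : ∀ s l, keep l = false → step s l = s) :
    ∀ (ls : List α) (s : β), ls.foldl step s = (ls.filter keep).foldl step s := by
  intro ls
  induction ls with
  | nil => intro s; rfl
  | cons l rest ih =>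
    intro s
    by_cases hk : keep l = true
    · simp [hk, ih]
    · simp only [Bool.not_eq_true] at hk
      simp [hk, h s l hk, ih]

theorem pvA_side (hl : String) :
    ∀ (ls : List String),
      (∀ l ∈ ls, PySem.Str.startswith l hl = true ∨ PySem.Str.startswith l "<?xml" = false) →
      ∀ (acc out : List String),
      (let s := ls.foldl (fun (s : List String × List String) (line : String) =>
        if PySem.Str.startswith line hl then
          (if s.1 ≠ [] then ([line], s.2 ++ [PySem.Str.join "\n" s.1]) else ([line], s.2))
        else if PySem.Str.startswith line "<?xml" then s
        else (s.1 ++ [line], s.2)) (acc, out)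
      ; s.2 ++ [PySem.Str.join "\n" s.1]) =
      out ++ pvFinalize (acc ++ (pvGroups (fun l => PySem.Str.startswith l hl) ls).1,
                         (pvGroups (fun l => PySem.Str.startswith l hl) ls).2) := by
  intro ls
  induction ls with
  | nil =>
    intro _ acc out
    simp [pvGroups, pvFinalize]
  | cons l rest ih =>
    intro hkeep acc out
    have hrest := fun x hx => hkeep x (List.mem_cons_of_mem _ hx)
    by_cases hP : PySem.Str.startswith l hl = true
    · have hg : pvGroups (fun l => PySem.Str.startswith l hl) (l :: rest) =
        ([], (l :: (pvGroups (fun l => PySem.Str.startswith l hl) rest).1) ::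
             (pvGroups (fun l => PySem.Str.startswith l hl) rest).2) := by
        simp only [pvGroups, hP, if_true, reduceIte]
      by_cases hacc : acc = []
      · subst hacc
        have h2 := ih hrest [l] out
        simp only [List.foldl_cons, hP, ne_eq, reduceIte, not_true_eq_false, ite_false,
          ite_true, not_false_iff] at h2 ⊢
        rw [hg] at ⊢
        rw [h2]
        simp [pvFinalize]
      · have h2 := ih hrest [l] (out ++ [PySem.Str.join "\n" acc])
        simp only [List.foldl_cons, hP, ne_eq, reduceIte, not_true_eq_false, ite_false,
          ite_true, not_false_iff] at h2 ⊢
        rw [if_pos hacc, hg, h2]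
        simp [pvFinalize, hacc]
    · have hQ : PySem.Str.startswith l "<?xml" = false := by
        rcases hkeep l (List.mem_cons_self) with h | h
        · exact absurd h hP
        · exact h
      have hg : pvGroups (fun l => PySem.Str.startswith l hl) (l :: rest) =
        (l :: (pvGroups (fun l => PySem.Str.startswith l hl) rest).1,
         (pvGroups (fun l => PySem.Str.startswith l hl) rest).2) := by
        simp only [pvGroups, hP, Bool.false_eq_true, if_false, reduceIte]
      have h2 := ih hrest (acc ++ [l]) out
      simp only [List.foldl_cons, hP, hQ, Bool.false_eq_true, if_false, reduceIte] at h2 ⊢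
      rw [hg, h2]
      simp [pvFinalize]

theorem pvMapShift (I : List Nat) (s : Int) :
    (I.map (· + 1)).map (fun k : Nat => s + (k : Int)) =
      I.map (fun k : Nat => (s + 1) + (k : Int)) := by
  rw [List.map_map]
  refine List.map_congr_left ?_
  intro k _
  simp only [Function.comp_apply]
  push_cast
  ring

theorem pvIdxs_enum (hl : String) (ls : List String) :
    ∀ (s : Int), (PySem.List.enumerate ls s).filterMap
      (fun il => if PySem.Str.startswith il.2 hl then some il.1 else none) =
      (pvIdxsN (fun l => PySem.Str.startswith l hl) ls).map (fun (k : Nat) => s + (k : Int)) := by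
  induction ls with
  | nil => intro s; simp [PySem.List.enumerate_nil, pvIdxsN]
  | cons l rest ih =>
    intro s
    rw [PySem.List.enumerate_cons]
    by_cases hP : PySem.Str.startswith l hl = true
    · simp only [List.filterMap_cons, hP, ite_true, pvIdxsN, if_true, List.map_cons,
        pvMapShift, ih (s + 1), Nat.cast_zero, add_zero]
    · simp only [Bool.not_eq_true] at hP
      simp only [List.filterMap_cons, hP, Bool.false_eq_true, ite_false, pvIdxsN, if_false,
        pvMapShift, ih (s + 1)]

-- Nat-level core of B, after the enumerate/cast bridge
def pvCoreN (ls : List String) (I : List Nat) : List String :=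
  match I with
  | [] => [PySem.Str.join "\n" ls]
  | i0 :: rest =>
    (if 0 < i0 then [PySem.Str.join "\n" (ls.take i0)] else []) ++
    (List.zip (i0 :: rest) (rest ++ [ls.length])).map
      (fun ij => PySem.Str.join "\n" ((ls.drop ij.1).take (ij.2 - ij.1)))

theorem pvCast_core (hl : String) (ls : List String) :
    pvAltCore hl ls = pvCoreN ls (pvIdxsN (fun l => PySem.Str.startswith l hl) ls) := by
  unfold pvAltCore
  rw [pvIdxs_enum hl ls 0]
  cases hI : pvIdxsN (fun l => PySem.Str.startswith l hl) ls with
  | nil => simp [pvCoreN]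
  | cons i0 rest =>
    simp only [List.map_cons]
    show (if (0 + (i0 : Int) > 0) then
        [PySem.Str.join "\n" (PySem.List.slice ls none (some (0 + (i0 : Int))))] else []) ++
      (List.zip ((0 + (i0 : Int)) :: rest.map (fun k : Nat => 0 + (k : Int)))
        (rest.map (fun k : Nat => 0 + (k : Int)) ++ [(ls.length : Int)])).map
        (fun ij => PySem.Str.join "\n" (PySem.List.slice ls (some ij.1) (some ij.2))) = _
    have hz : ∀ (J : List Nat), J.map (fun k : Nat => 0 + (k : Int)) =
        J.map (fun k : Nat => (k : Int)) :=
      fun J => List.map_congr_left (fun k _ => by ring)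
    have h0 : (0 + (i0 : Int)) = ((i0 : Nat) : Int) := by ring
    rw [h0, hz]
    refine congrArg₂ (· ++ ·) ?_ ?_
    · by_cases hpos : 0 < i0
      · rw [if_pos (by exact_mod_cast hpos), if_pos hpos, PySem.List.slice_to_natCast]
      · rw [if_neg (by omega), if_neg hpos]
    · have hcat : (rest.map (fun k : Nat => (k : Int))) ++ [(ls.length : Int)] =
          (rest ++ [ls.length]).map (fun k : Nat => (k : Int)) := by
        simp
      rw [hcat, ← List.map_cons (f := fun k : Nat => (k : Int)), List.zip_map, List.map_map]
      refine List.map_congr_left ?_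
      intro ij _
      simp only [Function.comp_apply, Prod.map_fst, Prod.map_snd]
      rw [PySem.List.slice_natCast]

theorem pvL1 (P : String → Bool) :
    ∀ (f : List String), pvIdxsN P f = [] → pvGroups P f = (f, []) := by
  intro f
  induction f with
  | nil => intro _; rfl
  | cons l rest ih =>
    intro h
    by_cases hP : P l = true
    · simp [pvIdxsN, hP] at h
    · simp only [pvIdxsN, hP, Bool.false_eq_true, if_false, List.map_eq_nil_iff] at h
      simp [pvGroups, hP, ih h]

theorem pvL3 (P : String → Bool) :
    ∀ (f : List String) (i : Nat) (r : List Nat), pvIdxsN P f = i :: r →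
      i < f.length ∧ (pvGroups P f).1 = f.take i ∧ (pvGroups P f).2 ≠ [] := by
  intro f
  induction f with
  | nil => intro i r h; simp [pvIdxsN] at h
  | cons l rest ih =>
    intro i r h
    by_cases hP : P l = true
    · simp only [pvIdxsN, hP, if_true, List.cons.injEq] at h
      refine ⟨by simp [← h.1], ?_, ?_⟩ <;> simp [pvGroups, hP, ← h.1]
    · simp only [pvIdxsN, hP, Bool.false_eq_true, if_false] at h
      cases hI' : pvIdxsN P rest with
      | nil => rw [hI'] at h; simp at h
      | cons i' r' =>
        rw [hI'] at h
        simp only [List.map_cons, List.cons.injEq] at h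
        obtain ⟨hi, -⟩ := h
        obtain ⟨h1, h2, h3⟩ := ih i' r' hI'
        refine ⟨by simp [← hi]; omega, ?_, ?_⟩ <;>
          simp [pvGroups, hP, ← hi, h2, h3]

theorem pvZipShift (l : String) (f : List String) (xs ys : List Nat) :
    (List.zip (xs.map (· + 1)) (ys.map (· + 1))).map
      (fun ij => PySem.Str.join "\n" (((l :: f).drop ij.1).take (ij.2 - ij.1))) =
    (List.zip xs ys).map
      (fun ij => PySem.Str.join "\n" ((f.drop ij.1).take (ij.2 - ij.1))) := by
  rw [List.zip_map, List.map_map]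
  refine List.map_congr_left ?_
  intro ij _
  simp [Nat.succ_sub_succ]

theorem pvB_main (hl : String) :
    ∀ (ls : List String),
      pvCoreN ls (pvIdxsN (fun l => PySem.Str.startswith l hl) ls) =
      pvFinalize (pvGroups (fun l => PySem.Str.startswith l hl) ls) := by
  intro ls
  induction ls with
  | nil => simp [pvCoreN, pvIdxsN, pvGroups, pvFinalize]
  | cons l rest ih =>
    have hZ : ∀ (i0' : Nat) (r' : List Nat),
        pvIdxsN (fun l => PySem.Str.startswith l hl) rest = i0' :: r' →
        (List.zip (i0' :: r') (r' ++ [rest.length])).map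
          (fun ij => PySem.Str.join "\n" ((rest.drop ij.1).take (ij.2 - ij.1))) =
        ((pvGroups (fun l => PySem.Str.startswith l hl) rest).2).map
          (PySem.Str.join "\n") := by
      intro i0' r' hI'
      obtain ⟨hlt, hg1, hg2⟩ := pvL3 _ rest i0' r' hI'
      have hcore := ih
      rw [hI'] at hcore
      simp only [pvCoreN] at hcore
      by_cases h0 : 0 < i0'
      · have hne : rest.take i0' ≠ [] := by
          intro hc
          rw [List.take_eq_nil_iff] at hc
          rcases hc with h | h
          · omega
          · rw [h, List.length_nil] at hlt; omega
        rw [if_pos h0] at hcore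
        unfold pvFinalize at hcore
        rw [if_neg (fun hc => hne (hg1 ▸ hc.1))] at hcore
        have := congrArg List.tail hcore
        simpa using this
      · have hi0 : i0' = 0 := by omega
        subst hi0
        rw [if_neg h0] at hcore
        unfold pvFinalize at hcore
        rw [if_pos ⟨by simpa using hg1, hg2⟩] at hcore
        simpa using hcore
    by_cases hP : PySem.Str.startswith l hl = true
    · have hidx : pvIdxsN (fun l => PySem.Str.startswith l hl) (l :: rest) =
          0 :: (pvIdxsN (fun l => PySem.Str.startswith l hl) rest).map (· + 1) := by
        simp only [pvIdxsN, hP, if_true]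
      have hgrp : pvGroups (fun l => PySem.Str.startswith l hl) (l :: rest) =
          ([], (l :: (pvGroups (fun l => PySem.Str.startswith l hl) rest).1) ::
               (pvGroups (fun l => PySem.Str.startswith l hl) rest).2) := by
        simp only [pvGroups, hP, if_true]
      rw [hidx, hgrp]
      cases hI' : pvIdxsN (fun l => PySem.Str.startswith l hl) rest with
      | nil =>
        have hg := pvL1 _ rest hI'
        rw [hg]
        simp only [List.map_nil, pvCoreN, pvFinalize]
        rw [if_neg (Nat.lt_irrefl 0), if_pos (by simp)]
        have htake : List.take (rest.length + 1 - 0) (List.drop 0 (l :: rest)) = l :: rest := by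
          simp
        simp [htake]
      | cons i0' r' =>
        obtain ⟨hlt, hg1, hg2⟩ := pvL3 _ rest i0' r' hI'
        have hz := hZ i0' r' hI'
        have hshift : List.map (fun x => x + 1) r' ++ [rest.length + 1] =
            List.map (fun x => x + 1) (r' ++ [rest.length]) := by simp
        simp only [List.map_cons, pvCoreN, List.length_cons, List.cons_append,
          List.zip_cons_cons, hshift]
        rw [show (i0' + 1) :: List.map (fun x => x + 1) r' =
              List.map (fun x => x + 1) (i0' :: r') from rfl,
          pvZipShift l rest (i0' :: r') (r' ++ [rest.length]), hz]
        simp only [pvFinalize]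
        rw [if_neg (Nat.lt_irrefl 0), if_pos (by simp), hg1]
        simp [List.take_succ_cons]
    · have hQ : PySem.Str.startswith l hl = false := by
        simpa using hP
      have hidx : pvIdxsN (fun l => PySem.Str.startswith l hl) (l :: rest) =
          (pvIdxsN (fun l => PySem.Str.startswith l hl) rest).map (· + 1) := by
        simp only [pvIdxsN, hQ, Bool.false_eq_true, if_false]
      have hgrp : pvGroups (fun l => PySem.Str.startswith l hl) (l :: rest) =
          (l :: (pvGroups (fun l => PySem.Str.startswith l hl) rest).1,
           (pvGroups (fun l => PySem.Str.startswith l hl) rest).2) := by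
        simp only [pvGroups, hQ, Bool.false_eq_true, if_false]
      rw [hidx, hgrp]
      cases hI' : pvIdxsN (fun l => PySem.Str.startswith l hl) rest with
      | nil =>
        have hg := pvL1 _ rest hI'
        rw [hg]
        simp only [List.map_nil, pvCoreN, pvFinalize]
        rw [if_neg (by simp)]
        simp
      | cons i0' r' =>
        obtain ⟨hlt, hg1, hg2⟩ := pvL3 _ rest i0' r' hI'
        have hz := hZ i0' r' hI'
        have hshift : List.map (fun x => x + 1) r' ++ [rest.length + 1] =
            List.map (fun x => x + 1) (r' ++ [rest.length]) := by simp
        simp only [List.map_cons, pvCoreN, List.length_cons, List.cons_append, hshift]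
        rw [if_pos (Nat.succ_pos i0'),
          show (i0' + 1) :: List.map (fun x => x + 1) r' =
              List.map (fun x => x + 1) (i0' :: r') from rfl,
          pvZipShift l rest (i0' :: r') (r' ++ [rest.length]), hz]
        simp only [pvFinalize]
        rw [if_neg (by simp), hg1]
        simp [List.take_succ_cons]

theorem pvB_side (hl : String) (ls : List String) :
    pvAltCore hl ls = pvFinalize (pvGroups (fun l => PySem.Str.startswith l hl) ls) := by
  rw [pvCast_core, pvB_main]

-- ===== VERDICT (by name: the statement is the Claim_ definition above) =====
theorem load_from_string_spec : Claim_equal_load_from_string := by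
  intro xs hl _
  unfold Spec_load_from_string load_from_string load_from_string_alt
  rw [pvB_side]
  simp only
  rw [pvFoldl_skip _ (fun l => PySem.Str.startswith l hl || !PySem.Str.startswith l "<?xml")
    (by intro s l h; simp only [Bool.or_eq_false_iff, Bool.not_eq_false'] at h
        rw [h.1, h.2]; simp)]
  have := pvA_side hl ((PySem.Str.splitlines xs).filter
      (fun l => PySem.Str.startswith l hl || !PySem.Str.startswith l "<?xml"))
    (by intro l hml; have := List.of_mem_filter hml
        rcases Bool.or_eq_true _ _ |>.mp this with h | h
        · exact Or.inl h
        · exact Or.inr (by simpa using h)) [] []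
  simpa using this
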